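-- pv_equiv track=rewrite | github.com/enrique-mt/TareasCamposMata | Tarea1/tarea_1_example_solution.py | separa_letras
-- ===== SOURCE A (Python) =====
-- def separa_letras(string):
--     # Revisa si la entrada es una variable de tipo int
--     if type(string) is int:
--         return (-100, None, None)
--
--     # Revisa si la entrada es un string que contiene números enteros
--     # mediante el método isnumeric de Python
--     if string.isnumeric():
--         return (-100, None, None)
--
--     # Revisa si la entrada es un string vacio o un string de espacios
--     # en blanco mediante el método isspace de Python
--     if string.isspace() or not string:
--         return (-300, None, None)
--
--     # Revisa si el string contiene algún caracter fuera del abecedario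
--     # mediante el método isalpha de Python
--     if not string.isalpha():
--         return (-200, None, None)
--
--     # Luego de verificar los casos de error se inicializa dos variables
--     # de tipo string para que estos luego contengan las mayúsculas y
--     # minúsculas del string que se recibe a la entrada de la función. Mediante
--     # un for loop y la función isupper() se analiza cada elemento del string
--     # inicial y dependiendo de si este es una mayúscula o minúscula se agrega
--     # a la variable respectiva.
--     upper = lower = ""
--     for i in string:
--         if i.isupper():
--             upper = upper+i
--         else:
--             lower = lower+i
--     return (0, upper, lower)
-- ===== SOURCE B (Python) =====
-- def separa_letras(string):
--     if type(string) is int: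
--         return (-100, None, None)
--     if string.isnumeric():
--         return (-100, None, None)
--     if string.isspace() or not string:
--         return (-300, None, None)
--     if not string.isalpha():
--         return (-200, None, None)
--     # Stable sort by the boolean key isupper: lowers (and caseless alpha) keep
--     # their order at the front, uppers keep their order at the back; then split
--     # at the counted boundary.
--     chars = sorted(string, key=lambda c: c.isupper())
--     k = sum(1 for c in string if c.isupper())
--     split = len(string) - k
--     return (0, ''.join(chars[split:]), ''.join(chars[:split]))
-- ===== Notes on version B (the rewrite author's own statement) =====
-- stated objective: alternative
-- what changed: Instead of one loop classifying each character into two growing accumulators, B stably sorts the string by the boolean isupper key (lowers stay in order in front, uppers in order at the back) and splits the sorted list at a counted boundary; the four validation guards are unchanged.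
import Mathlib
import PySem

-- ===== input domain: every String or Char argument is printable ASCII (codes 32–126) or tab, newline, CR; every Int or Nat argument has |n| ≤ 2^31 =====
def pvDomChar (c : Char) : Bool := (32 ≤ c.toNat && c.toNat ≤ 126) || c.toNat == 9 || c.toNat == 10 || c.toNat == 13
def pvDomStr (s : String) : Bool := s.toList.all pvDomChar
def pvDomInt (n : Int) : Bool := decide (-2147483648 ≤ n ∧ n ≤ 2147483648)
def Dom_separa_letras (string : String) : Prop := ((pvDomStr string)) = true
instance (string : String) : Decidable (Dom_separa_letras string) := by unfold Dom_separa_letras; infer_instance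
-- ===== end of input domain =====

-- B replaces A's single classifying accumulator loop by a stable sort on the boolean isupper key
-- plus a counted split point (objective: alternative; same guards and values).
-- Note: 'string.isnumeric()' is ported as PySem.Str.strIsdigit — exact on the ASCII domain Dom, where the
-- numeric characters are exactly the digits; the 'type(string) is int' branch never fires for a String argument.

-- ===== PORT A =====
def separa_letras (string : String) : Int × Option String × Option String :=
  if PySem.Str.strIsdigit string then (-100, none, none)
  else if PySem.Str.strIsspace string || string == "" then (-300, none, none)
  else if !PySem.Str.strIsalpha string then (-200, none, none)
  else
    let p := string.toList.foldl
      (fun (p : List Char × List Char) i =>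
        if PySem.Chars.isupper i then (p.1 ++ [i], p.2) else (p.1, p.2 ++ [i]))
      ([], [])
    (0, some (String.mk p.1), some (String.mk p.2))

-- ===== PORT B =====
-- chars[split:] / chars[:split] with 0 ≤ split ≤ len(chars) are exactly List.drop/List.take.
def separa_letras_alt (string : String) : Int × Option String × Option String :=
  if PySem.Str.strIsdigit string then (-100, none, none)
  else if PySem.Str.strIsspace string || string == "" then (-300, none, none)
  else if !PySem.Str.strIsalpha string then (-200, none, none)
  else
    let chars := PySem.List.sorted string.toList (fun c => PySem.Chars.isupper c) false
    let k := (string.toList.map (fun c => if PySem.Chars.isupper c then 1 else 0)).sum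
    let split := string.toList.length - k
    (0, some (String.mk (chars.drop split)), some (String.mk (chars.take split)))

-- ===== PRECONDITION & SPEC =====
def Spec_separa_letras (string : String) (out : Int × Option String × Option String) : Prop := out = separa_letras_alt string
instance (string : String) (out : Int × Option String × Option String) : Decidable (Spec_separa_letras string out) := by unfold Spec_separa_letras; infer_instance

-- ===== CLAIM (what is proved, stated in full; the proofs are below) =====
def Claim_equal_separa_letras : Prop := ∀ (string : String), Dom_separa_letras string → Spec_separa_letras string (separa_letras string)

-- ===== LEMMAS AND PROOFS =====

-- A's loop accumulates exactly the two filters.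
theorem foldl_pair_filter (l : List Char) (u v : List Char) :
    l.foldl (fun (p : List Char × List Char) i =>
        if PySem.Chars.isupper i then (p.1 ++ [i], p.2) else (p.1, p.2 ++ [i])) (u, v)
    = (u ++ l.filter (fun c => PySem.Chars.isupper c),
       v ++ l.filter (fun c => !PySem.Chars.isupper c)) := by
  induction l generalizing u v with
  | nil => simp
  | cons c t ih =>
    by_cases h : PySem.Chars.isupper c = true <;>
      simp [List.foldl, h, ih, List.filter]

theorem insertBy_front {α : Type} (before : α → α → Bool) (x : α) (F : List α) (t : α)
    (ts : List α) (hF : ∀ y ∈ F, before x y = false) (ht : before x t = true) :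
    PySem.List.insertBy before x (F ++ t :: ts) = F ++ x :: t :: ts := by
  induction F with
  | nil => simp [PySem.List.insertBy, ht]
  | cons f fs ih =>
    have hf : before x f = false := hF f (by simp)
    simp [PySem.List.insertBy, hf, ih (fun y hy => hF y (by simp [hy]))]

-- Invariant of the stable insertion sort with a boolean key: the accumulator stays
-- a false-block followed by a true-block, each growing by the respective filter.
theorem foldl_insertBy_partition (up : Char → Bool) (l F T : List Char)
    (hF : ∀ y ∈ F, up y = false) (hT : ∀ y ∈ T, up y = true) :
    l.foldl (fun acc x => PySem.List.insertBy (fun a b => decide (up a < up b)) x acc) (F ++ T)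
    = (F ++ l.filter (fun c => !up c)) ++ (T ++ l.filter up) := by
  induction l generalizing F T with
  | nil => simp
  | cons x xs ih =>
    by_cases h : up x = true
    · have hins : PySem.List.insertBy (fun a b => decide (up a < up b)) x (F ++ T)
          = (F ++ T) ++ [x] := by
        apply PySem.List.insertBy_of_forall_not_before
        intro y _
        simp [h]
      have hT' : ∀ y ∈ T ++ [x], up y = true := by
        intro y hy; rcases List.mem_append.mp hy with hy | hy
        · exact hT y hy
        · simp at hy; simp [hy, h]
      simp only [List.foldl, hins, List.append_assoc]
      rw [ih F (T ++ [x]) hF hT']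
      simp [List.filter, h]
    · have hFx : ∀ y ∈ F ++ [x], up y = false := by
        intro y hy; rcases List.mem_append.mp hy with hy | hy
        · exact hF y hy
        · simp at hy; simp [hy, h]
      have hins : PySem.List.insertBy (fun a b => decide (up a < up b)) x (F ++ T)
          = (F ++ [x]) ++ T := by
        cases T with
        | nil =>
          simp only [List.append_nil]
          exact PySem.List.insertBy_of_forall_not_before _ _ _
            (fun y hy => by simp [hF y hy, h])
        | cons t ts =>
          have ht : decide (up x < up t) = true := by
            simp [h, hT t (by simp)]
          simpa using insertBy_front _ x F t ts (fun y hy => by simp [hF y hy, h]) ht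
      simp only [List.foldl, hins]
      rw [ih (F ++ [x]) T hFx hT]
      simp [List.filter, h]

-- The stable boolean-key sort IS the (lower, upper) partition.
theorem sorted_isupper_eq_partition (l : List Char) :
    PySem.List.sorted l (fun c => PySem.Chars.isupper c) false
    = l.filter (fun c => !PySem.Chars.isupper c) ++ l.filter (fun c => PySem.Chars.isupper c) := by
  rw [PySem.List.sorted_eq_foldl_insertBy]
  simpa using foldl_insertBy_partition (fun c => PySem.Chars.isupper c) l [] []
    (by simp) (by simp)

theorem sum_ite_eq_countP (l : List Char) :
    (l.map (fun c => if PySem.Chars.isupper c then 1 else 0)).sum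
    = l.countP (fun c => PySem.Chars.isupper c) := by
  induction l with
  | nil => rfl
  | cons c t ih =>
    by_cases h : PySem.Chars.isupper c = true <;> simp [h, ih, Nat.add_comm]

-- ===== VERDICT (by name: the statement is the Claim_ definition above) =====
theorem separa_letras_spec : Claim_equal_separa_letras := by
  intro s _
  unfold Spec_separa_letras separa_letras separa_letras_alt
  split_ifs with h1 h2 h3 <;> try rfl
  simp only [foldl_pair_filter, sorted_isupper_eq_partition, sum_ite_eq_countP,
    List.nil_append]
  have hsplit : s.toList.length - s.toList.countP (fun c => PySem.Chars.isupper c)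
      = (s.toList.filter (fun c => !PySem.Chars.isupper c)).length := by
    rw [← List.countP_eq_length_filter]
    have h2 := List.length_eq_countP_add_countP (fun c => PySem.Chars.isupper c) (l := s.toList)
    simp only [decide_not, Bool.decide_eq_true] at h2
    omega
  rw [hsplit, List.take_left, List.drop_left]
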